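-- pv_equiv track=rewrite | github.com/b0t-t0b/university_config_PR2 | main.py | _build_transitive_dependencies_bfs_recursive
-- ===== SOURCE A (Python) =====
-- def _build_transitive_dependencies_bfs_recursive(graph, start_package):
--     """Построение транзитивных зависимостей с помощью BFS с рекурсией"""
--     visited = set()
--     result_graph = {}
--
--     def bfs_recursive(current_level):
--         if not current_level:
--             return
--
--         next_level = []
--
--         for package in current_level:
--             if package in visited:
--                 continue
--
--             visited.add(package)
--             result_graph[package] = graph.get(package, [])
--
--             # Добавляем зависимости в следующий уровень
--             for dep in graph.get(package, []):
--                 if dep not in visited and dep not in next_level: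
--                     next_level.append(dep)
--
--         # Рекурсивный вызов для следующего уровня
--         bfs_recursive(next_level)
--
--     # Запускаем BFS с рекурсией
--     bfs_recursive([start_package])
--
--     return result_graph
-- ===== SOURCE B (Python) =====
-- def _build_transitive_dependencies_bfs_recursive(graph, start_package):
--     """Iterative BFS with a flat FIFO queue instead of level-by-level recursion."""
--     visited = set()
--     result_graph = {}
--     queue = [start_package]
--     while queue:
--         package = queue.pop(0)
--         if package in visited:
--             continue
--         visited.add(package)
--         deps = graph.get(package, [])
--         result_graph[package] = deps
--         queue.extend(deps)
--     return result_graph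
-- ===== Notes on version B (the rewrite author's own statement) =====
-- stated objective: idiomatic
-- what changed: Replaced the recursive level-by-level BFS (which builds a deduplicated next_level list per level) with a single flat FIFO-queue loop that enqueues all dependencies and skips already-visited packages when dequeuing.
import Mathlib
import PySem

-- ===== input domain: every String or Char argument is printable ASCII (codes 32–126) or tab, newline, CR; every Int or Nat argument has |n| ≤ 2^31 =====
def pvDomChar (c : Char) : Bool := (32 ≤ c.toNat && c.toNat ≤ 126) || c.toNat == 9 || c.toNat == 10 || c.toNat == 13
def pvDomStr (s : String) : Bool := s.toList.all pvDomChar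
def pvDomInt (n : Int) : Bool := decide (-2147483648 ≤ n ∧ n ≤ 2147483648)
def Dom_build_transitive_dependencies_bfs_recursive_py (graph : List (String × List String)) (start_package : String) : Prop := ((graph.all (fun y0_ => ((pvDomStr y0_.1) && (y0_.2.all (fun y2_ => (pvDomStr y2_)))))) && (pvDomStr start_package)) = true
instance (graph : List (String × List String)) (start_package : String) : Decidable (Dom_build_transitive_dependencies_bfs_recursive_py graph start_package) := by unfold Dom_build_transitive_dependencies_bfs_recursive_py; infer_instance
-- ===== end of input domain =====

-- B replaces A's recursive level-by-level BFS with a single flat FIFO-queue loop (idiomatic BFS);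
-- both build the same insertion-ordered result dict, returned here as its items list.

-- shared helper: graph.get(package, [])
def pvDeps (graph : List (String × List String)) (p : String) : List String :=
  PySem.Dict.getD (PySem.Dict.mk graph) p []

-- termination measure: number of graph keys not yet visited
def pvUnvisited (graph : List (String × List String)) (V : List String) : Nat :=
  ((graph.map Prod.fst).filter (fun k => decide (k ∉ V))).length

-- termination lemmas (cited by the ports' decreasing_by)
theorem pvUnvisited_lt (graph : List (String × List String)) (V V' : List String) (p : String)
    (hmono : ∀ x, x ∈ V → x ∈ V') (hk : p ∈ graph.map Prod.fst) (hnv : p ∉ V) (hv : p ∈ V') :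
    pvUnvisited graph V' < pvUnvisited graph V := by
  have hsub : ((graph.map Prod.fst).filter (fun k => decide (k ∉ V'))).Sublist
      ((graph.map Prod.fst).filter (fun k => decide (k ∉ V))) := by
    apply List.monotone_filter_right
    intro a ha
    simp only [decide_eq_true_eq] at *
    exact fun hvv => ha (hmono a hvv)
  rcases Nat.lt_or_ge (pvUnvisited graph V') (pvUnvisited graph V) with h | h
  · exact h
  · exfalso
    have heq := hsub.eq_of_length (Nat.le_antisymm hsub.length_le h)
    have hp : p ∈ (graph.map Prod.fst).filter (fun k => decide (k ∉ V)) := by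
      simp [List.mem_filter, hk, hnv]
    rw [← heq] at hp
    simp [List.mem_filter] at hp
    exact hp.2 hv

theorem pvDeps_eq_nil (graph : List (String × List String)) (p : String)
    (h : p ∉ graph.map Prod.fst) : pvDeps graph p = [] := by
  unfold pvDeps
  apply PySem.Dict.getD_of_not_contains
  rw [PySem.Dict.contains_eq_decide_mem_keys]
  simpa [PySem.Dict.keys] using h

theorem mem_set_add_iff (V : List String) (p x : String) :
    x ∈ PySem.Set.add V p ↔ x ∈ V ∨ x = p := by
  simp only [PySem.Set.add]
  split
  · rename_i h
    have hp : p ∈ V := by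
      simpa [PySem.Set.contains, List.contains_eq_mem] using h
    constructor
    · exact fun h => Or.inl h
    · rintro (h | rfl)
      · exact h
      · exact hp
  · simp [List.mem_append, or_comm]

theorem pvUnvisited_add_not_key (graph : List (String × List String)) (V : List String) (p : String)
    (h : p ∉ graph.map Prod.fst) :
    pvUnvisited graph (PySem.Set.add V p) = pvUnvisited graph V := by
  unfold pvUnvisited
  congr 1
  apply List.filter_congr
  intro k hk
  have hne : k ≠ p := fun e => h (e ▸ hk)
  simp [hne]

theorem mem_set_add (V : List String) (p x : String) (h : x ∈ V) : x ∈ PySem.Set.add V p :=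
  (mem_set_add_iff V p x).mpr (Or.inl h)

theorem self_mem_set_add (V : List String) (p : String) : p ∈ PySem.Set.add V p :=
  (mem_set_add_iff V p p).mpr (Or.inr rfl)

-- ===== PORT A =====
-- inner loop: for dep in graph.get(package, []): if dep not in visited and dep not in next_level: next_level.append(dep)
def pvInnerA (V' N ds : List String) : List String :=
  ds.foldl (fun acc d => if d ∉ V' ∧ d ∉ acc then acc ++ [d] else acc) N

-- body of 'for package in current_level', state = (visited, result_graph, next_level)
def pvStepA (graph : List (String × List String))
    (st : List String × PySem.Dict String (List String) × List String) (p : String) :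
    List String × PySem.Dict String (List String) × List String :=
  if p ∈ st.1 then st
  else
    let V' := PySem.Set.add st.1 p
    (V', st.2.1.insert p (pvDeps graph p), pvInnerA V' st.2.2 (pvDeps graph p))

-- fold invariant used only for termination of pvBfsRecA: visited grows, and a nonempty
-- next_level witnesses a newly visited graph key
theorem pvFoldA_progress (graph : List (String × List String)) (L V N : List String)
    (R : PySem.Dict String (List String)) :
    (∀ x, x ∈ V → x ∈ (L.foldl (pvStepA graph) (V, R, N)).1) ∧
    ((L.foldl (pvStepA graph) (V, R, N)).2.2 ≠ [] → N ≠ [] ∨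
      ∃ p, p ∈ graph.map Prod.fst ∧ p ∉ V ∧ p ∈ (L.foldl (pvStepA graph) (V, R, N)).1) := by
  induction L generalizing V R N with
  | nil => exact ⟨fun x h => h, fun h => Or.inl h⟩
  | cons p L ih =>
    simp only [List.foldl_cons]
    by_cases hp : p ∈ V
    · simp only [pvStepA, if_pos hp]
      exact ih V N R
    · simp only [pvStepA, if_neg hp]
      obtain ⟨ihm, ihp⟩ := ih (PySem.Set.add V p)
        (pvInnerA (PySem.Set.add V p) N (pvDeps graph p)) (R.insert p (pvDeps graph p))
      constructor
      · exact fun x hx => ihm x (mem_set_add V p x hx)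
      · intro hne
        rcases ihp hne with hN' | ⟨q, hq1, hq2, hq3⟩
        · by_cases hds : pvDeps graph p = []
          · rw [hds] at hN'
            simp only [pvInnerA, List.foldl_nil] at hN'
            exact Or.inl hN'
          · refine Or.inr ⟨p, ?_, hp, ihm p (self_mem_set_add V p)⟩
            by_contra hk
            exact hds (pvDeps_eq_nil graph p hk)
        · exact Or.inr ⟨q, hq1, fun hv => hq2 (mem_set_add V p q hv), hq3⟩

-- the recursive helper bfs_recursive(current_level); the 'if next = []' guard inlines the
-- immediately-returning recursive call on the empty level (totality guard only)
def pvBfsRecA (graph : List (String × List String)) (L V : List String)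
    (R : PySem.Dict String (List String)) : PySem.Dict String (List String) :=
  if L = [] then R
  else if (L.foldl (pvStepA graph) (V, R, [])).2.2 = [] then
    (L.foldl (pvStepA graph) (V, R, [])).2.1
  else
    pvBfsRecA graph (L.foldl (pvStepA graph) (V, R, [])).2.2
      (L.foldl (pvStepA graph) (V, R, [])).1 (L.foldl (pvStepA graph) (V, R, [])).2.1
termination_by pvUnvisited graph V
decreasing_by
  simp only [List.foldl_attach] at *
  rename_i hne
  obtain ⟨hm, hp⟩ := pvFoldA_progress graph L V [] R
  rcases hp hne with h | ⟨p, hk, hnv, hv⟩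
  · exact absurd rfl h
  · exact pvUnvisited_lt graph V _ p hm hk hnv hv

def build_transitive_dependencies_bfs_recursive_py (graph : List (String × List String)) (start_package : String) : List (String × List String) :=
  (pvBfsRecA graph [start_package] [] PySem.Dict.empty).items

-- ===== PORT B =====
-- while queue: pop front, skip visited, else visit and extend queue with deps
def pvBfsQ (graph : List (String × List String)) (Q V : List String)
    (R : PySem.Dict String (List String)) : PySem.Dict String (List String) :=
  match Q with
  | [] => R
  | p :: rest =>
    if p ∈ V then pvBfsQ graph rest V R
    else pvBfsQ graph (rest ++ pvDeps graph p) (PySem.Set.add V p)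
           (R.insert p (pvDeps graph p))
termination_by (pvUnvisited graph V, Q.length)
decreasing_by
  · apply Prod.Lex.right
    simp
  · rename_i hp
    by_cases hk : p ∈ graph.map Prod.fst
    · exact Prod.Lex.left _ _ (pvUnvisited_lt graph V _ p (mem_set_add V p)
        hk hp (self_mem_set_add V p))
    · rw [pvUnvisited_add_not_key graph V p hk]
      apply Prod.Lex.right
      simp [pvDeps_eq_nil graph p hk]

def build_transitive_dependencies_bfs_recursive_py_alt (graph : List (String × List String)) (start_package : String) : List (String × List String) :=
  (pvBfsQ graph [start_package] [] PySem.Dict.empty).items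

-- ===== PRECONDITION & SPEC =====
def Spec_build_transitive_dependencies_bfs_recursive_py (graph : List (String × List String)) (start_package : String) (out : List (String × List String)) : Prop := out = build_transitive_dependencies_bfs_recursive_py_alt graph start_package
instance (graph : List (String × List String)) (start_package : String) (out : List (String × List String)) : Decidable (Spec_build_transitive_dependencies_bfs_recursive_py graph start_package out) := by unfold Spec_build_transitive_dependencies_bfs_recursive_py; infer_instance

-- ===== CLAIM (what is proved, stated in full; the proofs are below) =====
def Claim_equal_build_transitive_dependencies_bfs_recursive_py : Prop := ∀ (graph : List (String × List String)) (start_package : String), Dom_build_transitive_dependencies_bfs_recursive_py graph start_package → Spec_build_transitive_dependencies_bfs_recursive_py graph start_package (build_transitive_dependencies_bfs_recursive_py graph start_package)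

-- ===== LEMMAS AND PROOFS =====

theorem pvBfsQ_nil (graph : List (String × List String)) (V : List String)
    (R : PySem.Dict String (List String)) : pvBfsQ graph [] V R = R := by
  rw [pvBfsQ]

theorem pvBfsQ_cons (graph : List (String × List String)) (p : String) (rest V : List String)
    (R : PySem.Dict String (List String)) :
    pvBfsQ graph (p :: rest) V R =
      if p ∈ V then pvBfsQ graph rest V R
      else pvBfsQ graph (rest ++ pvDeps graph p) (PySem.Set.add V p)
             (R.insert p (pvDeps graph p)) := by
  rw [pvBfsQ]

-- deleting a queue element that is already visited, or occurs earlier in the queue,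
-- does not change the result
theorem pvBfsQ_del (graph : List (String × List String)) (Q1 : List String) :
    ∀ (Q2 V : List String) (R : PySem.Dict String (List String)) (p : String),
    (p ∈ V ∨ p ∈ Q1) →
    pvBfsQ graph (Q1 ++ p :: Q2) V R = pvBfsQ graph (Q1 ++ Q2) V R := by
  induction Q1 with
  | nil =>
    intro Q2 V R p hp
    rcases hp with hp | hp
    · simp [pvBfsQ_cons, hp]
    · simp at hp
  | cons q Q1 ih =>
    intro Q2 V R p hp
    simp only [List.cons_append, pvBfsQ_cons]
    by_cases hq : q ∈ V
    · simp only [if_pos hq]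
      apply ih
      rcases hp with hp | hp
      · exact Or.inl hp
      · rcases List.mem_cons.mp hp with rfl | hp
        · exact Or.inl hq
        · exact Or.inr hp
    · simp only [if_neg hq]
      have h1 : (Q1 ++ p :: Q2) ++ pvDeps graph q = Q1 ++ p :: (Q2 ++ pvDeps graph q) := by
        simp
      have h2 : (Q1 ++ Q2) ++ pvDeps graph q = Q1 ++ (Q2 ++ pvDeps graph q) := by simp
      rw [h1, h2]
      apply ih
      rcases hp with hp | hp
      · exact Or.inl (mem_set_add V q p hp)
      · rcases List.mem_cons.mp hp with rfl | hp
        · exact Or.inl (self_mem_set_add V p)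
        · exact Or.inr hp

-- appending raw deps after the queue equals appending A's deduplicated next_level additions
theorem pvBfsQ_inner (graph : List (String × List String)) (ds : List String) :
    ∀ (L N V : List String) (R : PySem.Dict String (List String)),
    pvBfsQ graph ((L ++ N) ++ ds) V R = pvBfsQ graph (L ++ pvInnerA V N ds) V R := by
  induction ds with
  | nil => intro L N V R; simp [pvInnerA]
  | cons d ds ih =>
    intro L N V R
    by_cases hd : d ∉ V ∧ d ∉ N
    · have h1 : (L ++ N) ++ d :: ds = (L ++ (N ++ [d])) ++ ds := by simp
      have h2 : pvInnerA V N (d :: ds) = pvInnerA V (N ++ [d]) ds := by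
        simp [pvInnerA, hd]
      rw [h1, h2, ih]
    · have h2 : pvInnerA V N (d :: ds) = pvInnerA V N ds := by
        simp only [pvInnerA, List.foldl_cons, if_neg hd]
      have h1 : (L ++ N) ++ d :: ds = (L ++ N) ++ d :: ds := rfl
      rw [h2, pvBfsQ_del graph (L ++ N) ds V R d, ih]
      rcases not_and_or.mp hd with hv | hn
      · exact Or.inl (not_not.mp hv)
      · exact Or.inr (List.mem_append.mpr (Or.inr (not_not.mp hn)))

-- running the queue on a level ++ next_level equals folding A's per-package step over the level
theorem pvBfsQ_level (graph : List (String × List String)) (L : List String) :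
    ∀ (V N : List String) (R : PySem.Dict String (List String)),
    pvBfsQ graph (L ++ N) V R =
      pvBfsQ graph (L.foldl (pvStepA graph) (V, R, N)).2.2
        (L.foldl (pvStepA graph) (V, R, N)).1 (L.foldl (pvStepA graph) (V, R, N)).2.1 := by
  induction L with
  | nil => intro V N R; simp
  | cons p L ih =>
    intro V N R
    simp only [List.cons_append, pvBfsQ_cons, List.foldl_cons]
    by_cases hp : p ∈ V
    · simp only [if_pos hp, pvStepA]
      exact ih V N R
    · simp only [if_neg hp]
      have h1 : (L ++ N) ++ pvDeps graph p = (L ++ N) ++ pvDeps graph p := rfl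
      rw [pvBfsQ_inner graph (pvDeps graph p) L N (PySem.Set.add V p)
        (R.insert p (pvDeps graph p))]
      have h2 : pvStepA graph (V, R, N) p =
          (PySem.Set.add V p, R.insert p (pvDeps graph p),
            pvInnerA (PySem.Set.add V p) N (pvDeps graph p)) := by
        simp [pvStepA, hp]
      rw [h2]
      exact ih (PySem.Set.add V p) (pvInnerA (PySem.Set.add V p) N (pvDeps graph p))
        (R.insert p (pvDeps graph p))

theorem pvBfsRecA_eq_pvBfsQ (graph : List (String × List String)) :
    ∀ (L V : List String) (R : PySem.Dict String (List String)),
    pvBfsRecA graph L V R = pvBfsQ graph L V R := by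
  intro L V R
  generalize hn : pvUnvisited graph V = n
  induction n using Nat.strong_induction_on generalizing L V R with
  | _ n ih =>
  subst hn
  rw [pvBfsRecA]
  by_cases hL : L = []
  · rw [if_pos hL, hL, pvBfsQ_nil]
  · rw [if_neg hL]
    have hlev := pvBfsQ_level graph L V [] R
    rw [List.append_nil] at hlev
    by_cases hN : (L.foldl (pvStepA graph) (V, R, [])).2.2 = []
    · rw [if_pos hN, hlev, hN, pvBfsQ_nil]
    · rw [if_neg hN, hlev]
      obtain ⟨hm, hp⟩ := pvFoldA_progress graph L V [] R
      rcases hp hN with h | ⟨p, hk, hnv, hv⟩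
      · exact absurd rfl h
      · exact ih _ (pvUnvisited_lt graph V _ p hm hk hnv hv) _ _ _ rfl

-- ===== VERDICT (by name: the statement is the Claim_ definition above) =====
theorem build_transitive_dependencies_bfs_recursive_py_spec : Claim_equal_build_transitive_dependencies_bfs_recursive_py := by
  intro graph start_package _
  unfold Spec_build_transitive_dependencies_bfs_recursive_py
  unfold build_transitive_dependencies_bfs_recursive_py build_transitive_dependencies_bfs_recursive_py_alt
  rw [pvBfsRecA_eq_pvBfsQ]
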